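-- pv_equiv track=rewrite | github.com/Davidan65/Two-API-ChatBot | bot.py | extract_phrases
-- ===== SOURCE A (Python) =====
-- from typing import List, Set, Dict, Tuple
--
-- def extract_phrases(text: str) -> Set[str]:
--     """Extract meaningful phrases from text."""
--     # Remove common words and split into phrases
--     words = text.lower().split()
--     common_words = {'the', 'a', 'an', 'and', 'or', 'but', 'is', 'are', 'was', 'were', 'i', 'you', 'he', 'she', 'it', 'we', 'they', 'my', 'your', 'his', 'her', 'its', 'our', 'their', 'in', 'on', 'at', 'to', 'for', 'with', 'by', 'about', 'against', 'between', 'into', 'through', 'during', 'before', 'after', 'above', 'below', 'from', 'up', 'down', 'in', 'out', 'off', 'over', 'under', 'again', 'further', 'then', 'once', 'here', 'there', 'when', 'where', 'why', 'how', 'all', 'any', 'both', 'each', 'few', 'more', 'most', 'other', 'some', 'such', 'no', 'nor', 'not', 'only', 'own', 'same', 'so', 'than', 'too', 'very', 's', 't', 'can', 'will', 'just', 'don', 'should', 'now'}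
--     phrases = set()
--
--     # Extract 3-5 word phrases (increased from 2-4)
--     for i in range(len(words) - 2):
--         phrase = ' '.join(words[i:i+3])
--         if not any(word in common_words for word in phrase.split()):
--             phrases.add(phrase)
--     for i in range(len(words) - 3):
--         phrase = ' '.join(words[i:i+4])
--         if not any(word in common_words for word in phrase.split()):
--             phrases.add(phrase)
--     for i in range(len(words) - 4):
--         phrase = ' '.join(words[i:i+5])
--         if not any(word in common_words for word in phrase.split()):
--             phrases.add(phrase)
--
--     return phrases
-- ===== SOURCE B (Python) =====
-- def extract_phrases(text: str):
--     """Extract meaningful phrases from text (suffix-streak formulation)."""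
--     words = text.lower().split()
--     common_words = {'the', 'a', 'an', 'and', 'or', 'but', 'is', 'are', 'was', 'were', 'i', 'you', 'he', 'she', 'it', 'we', 'they', 'my', 'your', 'his', 'her', 'its', 'our', 'their', 'in', 'on', 'at', 'to', 'for', 'with', 'by', 'about', 'against', 'between', 'into', 'through', 'during', 'before', 'after', 'above', 'below', 'from', 'up', 'down', 'in', 'out', 'off', 'over', 'under', 'again', 'further', 'then', 'once', 'here', 'there', 'when', 'where', 'why', 'how', 'all', 'any', 'both', 'each', 'few', 'more', 'most', 'other', 'some', 'such', 'no', 'nor', 'not', 'only', 'own', 'same', 'so', 'than', 'too', 'very', 's', 't', 'can', 'will', 'just', 'don', 'should', 'now'}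
--     # streak[i] = number of consecutive non-common words starting at position i
--     streak = [0]
--     for w in reversed(words):
--         streak.append(0 if w in common_words else streak[-1] + 1)
--     streak.reverse()
--     phrases = set()
--     for size in (3, 4, 5):
--         for i in range(len(words) - size + 1):
--             if streak[i] >= size:
--                 phrases.add(' '.join(words[i:i + size]))
--     return phrases
-- ===== Notes on version B (the rewrite author's own statement) =====
-- stated objective: alternative
-- what changed: B replaces A's per-window join-then-resplit-then-rescan membership test with a single right-to-left pass that precomputes, for every position, the streak of consecutive non-common words starting there, so each window is accepted by one O(1) comparison streak[i] >= size.
import Mathlib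
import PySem

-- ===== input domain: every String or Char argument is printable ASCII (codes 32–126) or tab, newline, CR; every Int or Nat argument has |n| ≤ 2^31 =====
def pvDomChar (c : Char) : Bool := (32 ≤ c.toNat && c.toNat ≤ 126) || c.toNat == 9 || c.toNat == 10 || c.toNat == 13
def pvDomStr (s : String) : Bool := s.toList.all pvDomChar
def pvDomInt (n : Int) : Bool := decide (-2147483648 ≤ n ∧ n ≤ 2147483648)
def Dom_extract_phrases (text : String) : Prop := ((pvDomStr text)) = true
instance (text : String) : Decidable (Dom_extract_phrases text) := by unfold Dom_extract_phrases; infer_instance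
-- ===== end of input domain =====

-- B replaces A's per-window join/re-split/re-scan test by a precomputed suffix-streak array
-- consulted in O(1) per window (objective: alternative; return value is a set, proved equal as the
-- same insertion-ordered list of distinct phrases).

-- the common-word set literal shared by both Python versions (source order, duplicate 'in' kept)
def pvCommon : PySem.Set String := PySem.Set.ofList ["the", "a", "an", "and", "or", "but", "is", "are", "was", "were", "i", "you", "he", "she", "it", "we", "they", "my", "your", "his", "her", "its", "our", "their", "in", "on", "at", "to", "for", "with", "by", "about", "against", "between", "into", "through", "during", "before", "after", "above", "below", "from", "up", "down", "in", "out", "off", "over", "under", "again", "further", "then", "once", "here", "there", "when", "where", "why", "how", "all", "any", "both", "each", "few", "more", "most", "other", "some", "such", "no", "nor", "not", "only", "own", "same", "so", "than", "too", "very", "s", "t", "can", "will", "just", "don", "should", "now"]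

-- ===== PORT A =====
def extract_phrases (text : String) : List String :=
  let words := PySem.Str.split₀ (PySem.Str.lower text)
  let phrases : PySem.Set String := PySem.Set.empty
  let phrases := (PySem.List.pyRange 0 ((words.length : Int) - 2) 1).foldl (fun ph i =>
    let phrase := PySem.Str.join " " (PySem.List.slice words (some i) (some (i + 3)))
    if (PySem.Str.split₀ phrase).any (fun w => PySem.Set.contains pvCommon w) then ph
    else PySem.Set.add ph phrase) phrases
  let phrases := (PySem.List.pyRange 0 ((words.length : Int) - 3) 1).foldl (fun ph i =>
    let phrase := PySem.Str.join " " (PySem.List.slice words (some i) (some (i + 4)))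
    if (PySem.Str.split₀ phrase).any (fun w => PySem.Set.contains pvCommon w) then ph
    else PySem.Set.add ph phrase) phrases
  let phrases := (PySem.List.pyRange 0 ((words.length : Int) - 4) 1).foldl (fun ph i =>
    let phrase := PySem.Str.join " " (PySem.List.slice words (some i) (some (i + 5)))
    if (PySem.Str.split₀ phrase).any (fun w => PySem.Set.contains pvCommon w) then ph
    else PySem.Set.add ph phrase) phrases
  phrases

-- ===== PORT B =====
def extract_phrases_alt (text : String) : List String :=
  let words := PySem.Str.split₀ (PySem.Str.lower text)
  let streak : List Int := [0]
  let streak := words.reverse.foldl (fun acc w =>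
    acc ++ [if PySem.Set.contains pvCommon w then 0 else PySem.List.pyGetD acc (-1) 0 + 1]) streak
  let streak := streak.reverse
  let phrases : PySem.Set String := PySem.Set.empty
  let phrases := ([3, 4, 5] : List Int).foldl (fun ph size =>
    (PySem.List.pyRange 0 ((words.length : Int) - size + 1) 1).foldl (fun ph i =>
      if size ≤ PySem.List.pyGetD streak i 0 then
        PySem.Set.add ph (PySem.Str.join " " (PySem.List.slice words (some i) (some (i + size))))
      else ph) ph) phrases
  phrases

-- ===== PRECONDITION & SPEC =====
def Spec_extract_phrases (text : String) (out : List String) : Prop := out = extract_phrases_alt text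
instance (text : String) (out : List String) : Decidable (Spec_extract_phrases text out) := by unfold Spec_extract_phrases; infer_instance

-- ===== CLAIM (what is proved, stated in full; the proofs are below) =====
def Claim_equal_extract_phrases : Prop := ∀ (text : String), Dom_extract_phrases text → Spec_extract_phrases text (extract_phrases text)

-- ===== LEMMAS AND PROOFS =====
-- well-formed word: nonempty, no whitespace characters
def pvWf (w : List Char) : Prop := w ≠ [] ∧ ∀ c ∈ w, PySem.Chars.isspace c = false

lemma pv_go_eq_nil (cur : List Char) (acc : List (List Char)) :
    PySem.Chars.split₀.go [] cur acc =
      if cur.isEmpty then acc.reverse else (cur.reverse :: acc).reverse := by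
  rw [PySem.Chars.split₀.go]

lemma pv_go_eq_cons (c : Char) (rest cur : List Char) (acc : List (List Char)) :
    PySem.Chars.split₀.go (c :: rest) cur acc =
      if PySem.Chars.isspace c then (if cur.isEmpty then PySem.Chars.split₀.go rest [] acc
        else PySem.Chars.split₀.go rest [] (cur.reverse :: acc))
      else PySem.Chars.split₀.go rest (c :: cur) acc := by
  rw [PySem.Chars.split₀.go]

lemma pv_go_wf (s : List Char) : ∀ (cur : List Char) (acc : List (List Char)),
    (∀ w ∈ acc, pvWf w) → (∀ c ∈ cur, PySem.Chars.isspace c = false) →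
    ∀ w ∈ PySem.Chars.split₀.go s cur acc, pvWf w := by
  induction s with
  | nil =>
    intro cur acc hacc hcur w hw
    rw [pv_go_eq_nil] at hw
    by_cases hne : cur = []
    · subst hne; simp at hw
      exact hacc w hw
    · rw [if_neg (by simpa [List.isEmpty_iff] using hne)] at hw
      rw [List.mem_reverse, List.mem_cons] at hw
      rcases hw with h | h
      · subst h
        exact ⟨by simpa using hne, fun c hc => hcur c (List.mem_reverse.mp hc)⟩
      · exact hacc w h
  | cons c rest ih =>
    intro cur acc hacc hcur w hw
    rw [pv_go_eq_cons] at hw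
    by_cases hsp : PySem.Chars.isspace c = true
    · rw [if_pos hsp] at hw
      by_cases hne : cur = []
      · subst hne; simp at hw
        exact ih [] acc hacc (by simp) w hw
      · rw [if_neg (by simpa [List.isEmpty_iff] using hne)] at hw
        refine ih [] _ ?_ (by simp) w hw
        intro w' hw'
        rw [List.mem_cons] at hw'
        rcases hw' with h | h
        · subst h
          exact ⟨by simpa using hne, fun c' hc' => hcur c' (List.mem_reverse.mp hc')⟩
        · exact hacc w' h
    · rw [if_neg hsp] at hw
      refine ih (c :: cur) acc hacc ?_ w hw
      intro c' hc'
      rw [List.mem_cons] at hc'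
      rcases hc' with h | h
      · subst h; simpa using hsp
      · exact hcur c' h

lemma pv_split_wf_chars (s : List Char) : ∀ w ∈ PySem.Chars.split₀ s, pvWf w := by
  intro w hw
  exact pv_go_wf s [] [] (by simp) (by simp) w hw

lemma pv_go_word (w : List Char) : ∀ (rest cur : List Char) (acc : List (List Char)),
    (∀ c ∈ w, PySem.Chars.isspace c = false) →
    PySem.Chars.split₀.go (w ++ rest) cur acc = PySem.Chars.split₀.go rest (w.reverse ++ cur) acc := by
  induction w with
  | nil => intro rest cur acc _; simp
  | cons c w ih =>
    intro rest cur acc h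
    have hc : PySem.Chars.isspace c = false := h c (by simp)
    rw [List.cons_append, pv_go_eq_cons, hc]
    simp only [Bool.false_eq_true, if_false]
    rw [ih rest (c :: cur) acc (fun c' hc' => h c' (by simp [hc']))]
    simp

lemma pv_go_join (ws : List (List Char)) : ∀ (acc : List (List Char)),
    (∀ w ∈ ws, pvWf w) →
    PySem.Chars.split₀.go (PySem.Chars.join [' '] ws) [] acc = acc.reverse ++ ws := by
  induction ws with
  | nil => intro acc _; simp [PySem.Chars.join_nil, pv_go_eq_nil]
  | cons w ws ih =>
    intro acc h
    have hw : pvWf w := h w (by simp)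
    have hwe : w.reverse.isEmpty = false := by simpa [List.isEmpty_iff] using hw.1
    cases ws with
    | nil =>
      rw [PySem.Chars.join_singleton, show w = w ++ [] by simp,
        pv_go_word w [] [] acc hw.2, pv_go_eq_nil]
      simp only [List.append_nil, hwe, Bool.false_eq_true, if_false, List.reverse_reverse]
      simp
    | cons w' ws' =>
      rw [PySem.Chars.join_cons_cons, List.append_assoc, pv_go_word w _ [] acc hw.2,
        List.cons_append, List.nil_append, pv_go_eq_cons]

      rw [if_pos (by decide)]
      simp only [List.append_nil, hwe, Bool.false_eq_true, if_false, List.reverse_reverse]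
      rw [ih (w :: acc) (fun w'' hw'' => h w'' (by simp [hw'']))]
      simp

lemma pv_roundtrip_chars (ws : List (List Char)) (h : ∀ w ∈ ws, pvWf w) :
    PySem.Chars.split₀ (PySem.Chars.join [' '] ws) = ws := by
  simpa [PySem.Chars.split₀] using pv_go_join ws [] h

lemma pv_split_wf (s : String) : ∀ w ∈ PySem.Str.split₀ s, pvWf w.toList := by
  intro w hw
  exact pv_split_wf_chars s.toList w.toList
    (by rw [← PySem.Str.split₀_map_toList]; exact List.mem_map_of_mem hw)

lemma pv_roundtrip_str (ws : List String) (h : ∀ w ∈ ws, pvWf w.toList) :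
    PySem.Str.split₀ (PySem.Str.join " " ws) = ws := by
  have hmap : List.map String.toList (PySem.Str.split₀ (PySem.Str.join " " ws))
      = List.map String.toList ws := by
    rw [PySem.Str.split₀_map_toList, PySem.Str.toList_join]
    exact pv_roundtrip_chars (ws.map String.toList)
      (by intro w hw; rcases List.mem_map.mp hw with ⟨w', hw', rfl⟩; exact h w' hw')
  exact List.map_injective_iff.mpr (fun a b hab => String.toList_inj.mp hab) hmap

-- suffix-streak list: pvF ws = [streak at 0, streak at 1, …, streak at ws.length = 0]
def pvStep (w : String) (acc : List Int) : List Int :=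
  (if PySem.Set.contains pvCommon w then 0 else acc.headI + 1) :: acc

def pvF (ws : List String) : List Int := ws.foldr pvStep [0]

lemma pv_head_headI (l : List Int) (h : l ≠ []) : l.head h = l.headI := by
  cases l with
  | nil => exact absurd rfl h
  | cons a l => rfl

lemma pvF_head_nonneg (ws : List String) : 0 ≤ (pvF ws).headI := by
  cases ws with
  | nil => simp [pvF]
  | cons w ws =>
    show (0:Int) ≤ (pvStep w (pvF ws)).headI
    rw [pvStep, List.headI_cons]
    split
    · simp
    · have := pvF_head_nonneg ws
      omega

-- the streak list built by B's reversed append loop is pvF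
lemma pv_streak_eq (ws : List String) :
    ((ws.reverse.foldl (fun acc w =>
      acc ++ [if PySem.Set.contains pvCommon w then 0 else PySem.List.pyGetD acc (-1) 0 + 1])
      ([0] : List Int)).reverse) = pvF ws := by
  rw [List.foldl_reverse]
  induction ws with
  | nil => rfl
  | cons w ws ih =>
    rw [List.foldr_cons]
    set R := ws.foldr (fun x y =>
      y ++ [if PySem.Set.contains pvCommon x then 0 else PySem.List.pyGetD y (-1) 0 + 1])
      ([0] : List Int) with hR
    have hRne : R ≠ [] := by
      cases ws with
      | nil => simp [hR]
      | cons a l => simp [hR]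
    rw [PySem.List.pyGetD_neg_one R 0 hRne, List.reverse_append]
    show (if PySem.Set.contains pvCommon w then 0 else R.getLast hRne + 1) :: R.reverse = pvF (w :: ws)
    have hlast : R.getLast hRne = (pvF ws).headI := by
      rw [List.getLast_eq_head_reverse, pv_head_headI, ih]
    show _ = pvStep w (pvF ws)
    rw [pvStep, hlast, ih]

lemma pvF_drop : ∀ (k : ℕ) (ws : List String), k ≤ ws.length →
    (pvF ws).drop k = pvF (ws.drop k) := by
  intro k
  induction k with
  | zero => intro ws _; simp
  | succ k ih =>
    intro ws hk
    cases ws with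
    | nil => simp at hk
    | cons w ws =>
      show (pvStep w (pvF ws)).drop (k+1) = _
      rw [pvStep, List.drop_succ_cons, List.drop_succ_cons]
      exact ih ws (by simpa using hk)

lemma pv_getD_headI_drop (l : List Int) (k : ℕ) : l.getD k 0 = (l.drop k).headI := by
  induction l generalizing k with
  | nil => cases k <;> rfl
  | cons x l ih => cases k with
    | zero => rfl
    | succ k => simpa using ih k

lemma pvF_head_ge (ws : List String) : ∀ (L : ℕ),
    ((L : Int) ≤ (pvF ws).headI) ↔
      (L ≤ ws.length ∧ ∀ w ∈ ws.take L, PySem.Set.contains pvCommon w = false) := by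
  induction ws with
  | nil =>
    intro L
    simp only [pvF, List.foldr_nil, List.headI, List.length_nil, List.take_nil,
      List.not_mem_nil, false_implies, implies_true, and_true]
    omega
  | cons w ws ih =>
    intro L
    show ((L : Int) ≤ (pvStep w (pvF ws)).headI) ↔ _
    rw [pvStep, List.headI_cons]
    by_cases hc : PySem.Set.contains pvCommon w = true
    · rw [if_pos hc]
      cases L with
      | zero => simp
      | succ L =>
        constructor
        · intro h; exfalso; omega
        · rintro ⟨-, hall⟩
          have := hall w (by simp)
          rw [hc] at this; cases this
    · rw [if_neg hc]
      cases L with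
      | zero =>
        have := pvF_head_nonneg ws
        constructor
        · intro _; simp
        · intro _; omega
      | succ L =>
        have hih := ih L
        constructor
        · intro h
          have : (L : Int) ≤ (pvF ws).headI := by push_cast at h ⊢; omega
          rcases hih.mp this with ⟨h1, h2⟩
          refine ⟨by simpa using h1, ?_⟩
          intro w' hw'
          rw [List.take_succ_cons, List.mem_cons] at hw'
          rcases hw' with rfl | hw'
          · simpa using hc
          · exact h2 w' hw'
        · rintro ⟨h1, h2⟩
          have : (L : Int) ≤ (pvF ws).headI := by
            refine hih.mpr ⟨by simpa using h1, ?_⟩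
            intro w' hw'
            exact h2 w' (by rw [List.take_succ_cons, List.mem_cons]; exact Or.inr hw')
          push_cast at this ⊢; omega

lemma pv_cond_B (ws : List String) (k l : ℕ) (hk : k + l ≤ ws.length) :
    ((l : Int) ≤ PySem.List.pyGetD (pvF ws) (k : Int) 0) ↔
      ∀ w ∈ (ws.drop k).take l, PySem.Set.contains pvCommon w = false := by
  rw [PySem.List.pyGetD_natCast, pv_getD_headI_drop, pvF_drop k ws (by omega), pvF_head_ge]
  have hlen : l ≤ ws.length - k := by omega
  simp [List.length_drop, hlen]

lemma pv_phase (ws : List String) (hwf : ∀ w ∈ ws, pvWf w.toList) (L : Int) (hL : 1 ≤ L)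
    (b : Int) (hb : b ≤ (ws.length : Int) - L + 1) (ph : PySem.Set String) :
    (PySem.List.pyRange 0 b 1).foldl (fun ph i =>
      if (PySem.Str.split₀ (PySem.Str.join " " (PySem.List.slice ws (some i) (some (i + L))))).any
          (fun w => PySem.Set.contains pvCommon w) then ph
      else PySem.Set.add ph (PySem.Str.join " " (PySem.List.slice ws (some i) (some (i + L))))) ph
    = (PySem.List.pyRange 0 b 1).foldl (fun ph i =>
      if L ≤ PySem.List.pyGetD (pvF ws) i 0 then
        PySem.Set.add ph (PySem.Str.join " " (PySem.List.slice ws (some i) (some (i + L))))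
      else ph) ph := by
  rw [PySem.List.foldl_congr_mem]
  intro acc i hi
  rw [PySem.List.mem_pyRange_one] at hi
  obtain ⟨h0, hlt⟩ := hi
  have hi' : i = (i.toNat : Int) := (Int.toNat_of_nonneg h0).symm
  have hL' : L = (L.toNat : Int) := (Int.toNat_of_nonneg (by omega)).symm
  have hkl : i.toNat + L.toNat ≤ ws.length := by
    have h1 : i + L ≤ (ws.length : Int) := by omega
    rw [hi', hL'] at h1
    exact_mod_cast h1
  rw [hi', hL', PySem.List.slice_natCast_add]
  have hwin : ∀ w ∈ (ws.drop i.toNat).take L.toNat, pvWf w.toList := by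
    intro w hw
    exact hwf w (List.mem_of_mem_drop (List.mem_of_mem_take hw))
  rw [pv_roundtrip_str _ hwin]
  have hcond := pv_cond_B ws i.toNat L.toNat hkl
  by_cases hany : ((ws.drop i.toNat).take L.toNat).any (fun w => PySem.Set.contains pvCommon w) = true
  · rw [if_pos hany, if_neg]
    intro hB
    rcases List.any_eq_true.mp hany with ⟨w, hw, hcw⟩
    have := hcond.mp hB w hw
    rw [hcw] at this
    cases this
  · have hany' : ((ws.drop i.toNat).take L.toNat).any (fun w => PySem.Set.contains pvCommon w) = false :=
      Bool.eq_false_iff.mpr hany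
    rw [if_neg hany, if_pos (hcond.mpr (by simpa using List.any_eq_false.mp hany'))]


-- ===== VERDICT (by name: the statement is the Claim_ definition above) =====
theorem extract_phrases_spec : Claim_equal_extract_phrases := by
  intro text _
  unfold Spec_extract_phrases
  simp only [extract_phrases, extract_phrases_alt, List.foldl_cons, List.foldl_nil]
  set ws := PySem.Str.split₀ (PySem.Str.lower text) with hws
  have hwf : ∀ w ∈ ws, pvWf w.toList := pv_split_wf _
  rw [pv_streak_eq]
  rw [show ((ws.length : Int) - 3 + 1) = (ws.length : Int) - 2 from by omega,
    show ((ws.length : Int) - 4 + 1) = (ws.length : Int) - 3 from by omega,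
    show ((ws.length : Int) - 5 + 1) = (ws.length : Int) - 4 from by omega]
  rw [pv_phase ws hwf 3 (by norm_num) ((ws.length : Int) - 2) (by omega),
    pv_phase ws hwf 4 (by norm_num) ((ws.length : Int) - 3) (by omega),
    pv_phase ws hwf 5 (by norm_num) ((ws.length : Int) - 4) (by omega)]
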